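-- pv_equiv track=rewrite | github.com/AmphionBird/tts-normalizer | tts_normalizer/languages/ja.py | _group4_to_ja
-- ===== SOURCE A (Python) =====
-- _DIGITS_JA = "〇一二三四五六七八九"
--
-- def _group4_to_ja(n: int) -> str:
--     """Convert a 4-digit group (1–9999) to Japanese kanji.
--
--     Rule: coefficient 1 is dropped before 十/百/千 (e.g. 百, 千)
--     but kept before 万/億/兆 (handled in _int_to_ja).
--     """
--     units = ["", "十", "百", "千"]
--     parts = []
--     for i in range(3, -1, -1):
--         d = n // (10 ** i) % 10
--         if d == 0:
--             continue
--         if d == 1 and i > 0: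
--             parts.append(units[i])          # 一十→十, 一百→百, 一千→千
--         else:
--             parts.append(_DIGITS_JA[d] + units[i])
--     return "".join(parts)
-- ===== SOURCE B (Python) =====
-- _DIGITS_JA = "〇一二三四五六七八九"
--
-- _THOUSANDS = ["", "千", "二千", "三千", "四千", "五千", "六千", "七千", "八千", "九千"]
-- _HUNDREDS  = ["", "百", "二百", "三百", "四百", "五百", "六百", "七百", "八百", "九百"]
-- _TENS      = ["", "十", "二十", "三十", "四十", "五十", "六十", "七十", "八十", "九十"]
-- _ONES      = ["", "一", "二", "三", "四", "五", "六", "七", "八", "九"]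
--
-- def _group4_to_ja(n: int) -> str:
--     """Table-driven: one precomputed ten-entry string table per decimal position,
--     result is the concatenation of four direct lookups (no loop, no branching)."""
--     q, r = divmod(n, 100)
--     return _THOUSANDS[q // 10 % 10] + _HUNDREDS[q % 10] + _TENS[r // 10] + _ONES[r % 10]
-- ===== Notes on version B (the rewrite author's own statement) =====
-- stated objective: alternative
-- what changed: B replaces A's digit loop with its coefficient-1 branch rules by four precomputed ten-entry kanji tables (one per decimal position) and returns the concatenation of four direct lookups, splitting n once with divmod(n, 100); no loop and no conditionals remain.
import Mathlib
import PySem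

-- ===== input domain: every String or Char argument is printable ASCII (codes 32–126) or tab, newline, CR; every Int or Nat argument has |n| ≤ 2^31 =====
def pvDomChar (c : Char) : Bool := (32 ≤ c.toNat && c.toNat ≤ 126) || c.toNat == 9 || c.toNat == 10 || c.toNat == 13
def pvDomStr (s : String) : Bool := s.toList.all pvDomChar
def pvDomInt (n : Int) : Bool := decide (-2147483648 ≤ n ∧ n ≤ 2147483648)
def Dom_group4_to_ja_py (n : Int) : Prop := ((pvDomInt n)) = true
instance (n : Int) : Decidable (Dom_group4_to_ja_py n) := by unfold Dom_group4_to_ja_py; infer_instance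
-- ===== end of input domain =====

-- B replaces A's digit loop and coefficient-1 branch rules by four precomputed ten-entry kanji
-- tables (one per decimal position) and concatenates four direct lookups (objective: alternative).
-- Both ports render ''.join / '+' on strings as String.ofList of concatenated List Char,
-- exact for concatenation.

-- ===== PORT A =====
def pvDigitsJA : List Char := "〇一二三四五六七八九".toList
def pvUnitsJA : List (List Char) := [[], "十".toList, "百".toList, "千".toList]

-- literal port of A: for i in range(3,-1,-1), d = n // 10**i % 10, branch as in the source
def group4_to_ja_py (n : Int) : String :=
  let parts : List (List Char) :=
    (PySem.List.pyRange 3 (-1) (-1)).foldl (fun parts i =>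
      let d : Int := PySem.Int.mod (PySem.Int.floordiv n (10 ^ i.toNat)) 10
      if d = 0 then parts
      else if d = 1 ∧ i > 0 then parts ++ [PySem.List.pyGetD pvUnitsJA i []]
      else parts ++ [PySem.List.pyGetD pvDigitsJA d ' ' :: PySem.List.pyGetD pvUnitsJA i []]) []
  String.ofList parts.flatten

-- ===== PORT B =====
def pvThousandsJA : List (List Char) :=
  ["".toList, "千".toList, "二千".toList, "三千".toList, "四千".toList, "五千".toList,
   "六千".toList, "七千".toList, "八千".toList, "九千".toList]
def pvHundredsJA : List (List Char) :=
  ["".toList, "百".toList, "二百".toList, "三百".toList, "四百".toList, "五百".toList,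
   "六百".toList, "七百".toList, "八百".toList, "九百".toList]
def pvTensJA : List (List Char) :=
  ["".toList, "十".toList, "二十".toList, "三十".toList, "四十".toList, "五十".toList,
   "六十".toList, "七十".toList, "八十".toList, "九十".toList]
def pvOnesJA : List (List Char) :=
  ["".toList, "一".toList, "二".toList, "三".toList, "四".toList, "五".toList,
   "六".toList, "七".toList, "八".toList, "九".toList]

-- literal port of Source B: q, r = divmod(n, 100); four table lookups concatenated
def group4_to_ja_py_alt (n : Int) : String :=
  let q : Int := PySem.Int.floordiv n 100
  let r : Int := PySem.Int.mod n 100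
  String.ofList
    (PySem.List.pyGetD pvThousandsJA (PySem.Int.mod (PySem.Int.floordiv q 10) 10) [] ++
     PySem.List.pyGetD pvHundredsJA (PySem.Int.mod q 10) [] ++
     PySem.List.pyGetD pvTensJA (PySem.Int.floordiv r 10) [] ++
     PySem.List.pyGetD pvOnesJA (PySem.Int.mod r 10) [])

-- ===== PRECONDITION & SPEC =====
def Spec_group4_to_ja_py (n : Int) (out : String) : Prop := out = group4_to_ja_py_alt n
instance (n : Int) (out : String) : Decidable (Spec_group4_to_ja_py n out) := by unfold Spec_group4_to_ja_py; infer_instance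

-- ===== CLAIM (what is proved, stated in full; the proofs are below) =====
def Claim_equal_group4_to_ja_py : Prop := ∀ (n : Int), Dom_group4_to_ja_py n → Spec_group4_to_ja_py n (group4_to_ja_py n)

-- ===== LEMMAS AND PROOFS =====

-- A's piece at position 3 equals B's thousands table entry, for any digit 0–9; likewise below.
theorem pieceThousands (d : Int) (h0 : 0 ≤ d) (h9 : d < 10) :
    (if d = 0 then ([] : List (List Char))
     else if d = 1 ∧ (3:Int) > 0 then [PySem.List.pyGetD pvUnitsJA 3 []]
     else [PySem.List.pyGetD pvDigitsJA d ' ' :: PySem.List.pyGetD pvUnitsJA 3 []]).flatten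
      = PySem.List.pyGetD pvThousandsJA d [] := by
  interval_cases d <;> decide

theorem pieceHundreds (d : Int) (h0 : 0 ≤ d) (h9 : d < 10) :
    (if d = 0 then ([] : List (List Char))
     else if d = 1 ∧ (2:Int) > 0 then [PySem.List.pyGetD pvUnitsJA 2 []]
     else [PySem.List.pyGetD pvDigitsJA d ' ' :: PySem.List.pyGetD pvUnitsJA 2 []]).flatten
      = PySem.List.pyGetD pvHundredsJA d [] := by
  interval_cases d <;> decide

theorem pieceTens (d : Int) (h0 : 0 ≤ d) (h9 : d < 10) :
    (if d = 0 then ([] : List (List Char))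
     else if d = 1 ∧ (1:Int) > 0 then [PySem.List.pyGetD pvUnitsJA 1 []]
     else [PySem.List.pyGetD pvDigitsJA d ' ' :: PySem.List.pyGetD pvUnitsJA 1 []]).flatten
      = PySem.List.pyGetD pvTensJA d [] := by
  interval_cases d <;> decide

theorem pieceOnes (d : Int) (h0 : 0 ≤ d) (h9 : d < 10) :
    (if d = 0 then ([] : List (List Char))
     else if d = 1 ∧ (0:Int) > 0 then [PySem.List.pyGetD pvUnitsJA 0 []]
     else [PySem.List.pyGetD pvDigitsJA d ' ' :: PySem.List.pyGetD pvUnitsJA 0 []]).flatten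
      = PySem.List.pyGetD pvOnesJA d [] := by
  interval_cases d <;> decide

theorem group4_eq (n : Int) : group4_to_ja_py n = group4_to_ja_py_alt n := by
  have h10 : (0:Int) < 10 := by norm_num
  unfold group4_to_ja_py group4_to_ja_py_alt
  rw [show PySem.List.pyRange 3 (-1) (-1) = [3, 2, 1, 0] from by decide]
  -- turn A's fold body into `acc ++ <piece>` form, then flatten the fold
  have hbody : (fun (parts : List (List Char)) (i : Int) =>
      let d : Int := PySem.Int.mod (PySem.Int.floordiv n (10 ^ i.toNat)) 10
      if d = 0 then parts
      else if d = 1 ∧ i > 0 then parts ++ [PySem.List.pyGetD pvUnitsJA i []]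
      else parts ++ [PySem.List.pyGetD pvDigitsJA d ' ' :: PySem.List.pyGetD pvUnitsJA i []])
    = (fun parts i =>
      parts ++ (let d : Int := PySem.Int.mod (PySem.Int.floordiv n (10 ^ i.toNat)) 10
        if d = 0 then []
        else if d = 1 ∧ i > 0 then [PySem.List.pyGetD pvUnitsJA i []]
        else [PySem.List.pyGetD pvDigitsJA d ' ' :: PySem.List.pyGetD pvUnitsJA i []])) := by
    funext parts i
    simp only []
    split_ifs <;> simp
  rw [hbody, PySem.List.foldl_append_eq_flatMap]
  simp only [List.flatMap_cons, List.flatMap_nil, List.append_nil, List.flatten_append]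
  simp only [show ((10:Int) ^ Int.toNat 3) = 1000 from by decide,
             show ((10:Int) ^ Int.toNat 2) = 100 from by decide,
             show ((10:Int) ^ Int.toNat 1) = 10 from by decide,
             show ((10:Int) ^ Int.toNat 0) = 1 from by decide]
  -- floor-division / Python-mod by a positive literal are Lean's ediv / emod
  simp only [PySem.Int.floordiv_eq_ediv_of_pos (show (0:Int) < 1000 by norm_num),
             PySem.Int.floordiv_eq_ediv_of_pos (show (0:Int) < 100 by norm_num),
             PySem.Int.floordiv_eq_ediv_of_pos h10,
             PySem.Int.floordiv_eq_ediv_of_pos (show (0:Int) < 1 by norm_num),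
             PySem.Int.mod_eq_emod_of_pos h10,
             PySem.Int.mod_eq_emod_of_pos (show (0:Int) < 100 by norm_num),
             Int.ediv_one]
  -- B's indices are A's digits of n
  rw [pieceThousands _ (Int.emod_nonneg _ (by norm_num)) (Int.emod_lt_of_pos _ (by norm_num)),
      pieceHundreds _ (Int.emod_nonneg _ (by norm_num)) (Int.emod_lt_of_pos _ (by norm_num)),
      pieceTens _ (Int.emod_nonneg _ (by norm_num)) (Int.emod_lt_of_pos _ (by norm_num)),
      pieceOnes _ (Int.emod_nonneg _ (by norm_num)) (Int.emod_lt_of_pos _ (by norm_num))]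
  rw [show n / 100 / 10 % 10 = n / 1000 % 10 from by omega,
      show n % 100 / 10 = n / 10 % 10 from by omega,
      show n % 100 % 10 = n % 10 from by omega]
  simp [List.append_assoc]

-- ===== VERDICT (by name: the statement is the Claim_ definition above) =====
theorem group4_to_ja_py_spec : Claim_equal_group4_to_ja_py := by
  intro n _
  unfold Spec_group4_to_ja_py
  exact group4_eq n
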